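-- pv_equiv track=rewrite | github.com/srujana-egov/EGOV_RAG_V5 | tests/test_core.py | _resolve_effective_query
-- ===== SOURCE A (Python) =====
-- def _resolve_effective_query(query, messages):
--     """
--     Inline copy of _resolve_effective_query for isolated testing.
--     Keep in sync with app.py implementation.
--     """
--     NEGATIVE_REPLIES = {"no", "nope", "none", "neither", "n", "nah", "not really", "no thanks"}
--     q = query.strip()
--     words = q.split()
--     if len(words) > 5:
--         return q
--     normalised = q.lower().rstrip(".,!?")
--     last_assistant = next(
--         (m for m in reversed(messages) if m["role"] == "assistant"), None
--     )
--     if last_assistant and last_assistant.get("source") == "chips":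
--         if normalised in NEGATIVE_REPLIES:
--             original = next(
--                 (m["content"] for m in reversed(messages)
--                  if m["role"] == "user"
--                  and m["content"].strip().lower().rstrip(".,!?") != normalised
--                  and len(m["content"].strip().split()) > 3),
--                 None,
--             )
--             if original:
--                 return original
--     last_substantive = next(
--         (m["content"] for m in reversed(messages)
--          if m["role"] == "user"
--          and m["content"].strip().lower().rstrip(".,!?") != normalised
--          and len(m["content"].strip().split()) > 5),
--         None,
--     )
--     if last_substantive:
--         return f"{last_substantive} {q}"
--     return q
-- ===== SOURCE B (Python) =====
-- def _resolve_effective_query(query, messages):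
--     """Single reverse pass capturing all three 'most recent' messages at once."""
--     NEGATIVE_REPLIES = {"no", "nope", "none", "neither", "n", "nah", "not really", "no thanks"}
--     q = query.strip()
--     if len(q.split()) > 5:
--         return q
--     normalised = q.lower().rstrip(".,!?")
--     assistant = original = substantive = None
--     for m in reversed(messages):
--         role = m["role"]
--         if role == "assistant":
--             if assistant is None:
--                 assistant = m
--         elif role == "user":
--             c = m["content"]
--             cs = c.strip()
--             if cs.lower().rstrip(".,!?") != normalised:
--                 n = len(cs.split())
--                 if original is None and n > 3:
--                     original = c
--                 if substantive is None and n > 5: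
--                     substantive = c
--     if (assistant is not None and assistant.get("source") == "chips"
--             and normalised in NEGATIVE_REPLIES and original):
--         return original
--     if substantive:
--         return substantive + " " + q
--     return q
-- ===== Notes on version B (the rewrite author's own statement) =====
-- stated objective: alternative
-- what changed: A's three independent reversed-message next() scans are replaced by one single reverse loop that captures the most-recent assistant message and the most-recent qualifying >3-word and >5-word user messages in one pass, then applies the same decision logic.
import Mathlib
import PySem

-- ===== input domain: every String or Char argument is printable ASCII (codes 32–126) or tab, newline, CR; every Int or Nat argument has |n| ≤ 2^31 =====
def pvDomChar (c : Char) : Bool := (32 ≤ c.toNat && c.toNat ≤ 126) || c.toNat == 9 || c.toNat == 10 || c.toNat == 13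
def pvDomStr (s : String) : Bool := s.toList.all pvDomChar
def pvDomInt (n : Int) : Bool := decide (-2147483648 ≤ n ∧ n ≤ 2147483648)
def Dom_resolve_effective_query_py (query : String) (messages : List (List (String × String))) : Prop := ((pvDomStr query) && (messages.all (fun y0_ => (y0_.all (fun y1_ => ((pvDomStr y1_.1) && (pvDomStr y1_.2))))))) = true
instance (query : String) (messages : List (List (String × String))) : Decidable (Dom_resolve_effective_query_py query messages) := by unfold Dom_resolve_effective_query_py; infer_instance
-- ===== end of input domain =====

-- B replaces A's three independent reversed-`next()` scans by one reverse fold that captures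
-- all three "most recent matching message" values at once (objective: alternative decomposition).

-- shared primitive ports (Python builtins / message-dict access, used by both sides)
-- s.rstrip(".,!?"): drop the chars '.', ',', '!', '?' from the right end (exact)
def pvRstripSpecial (s : String) : String :=
  String.ofList ((s.toList.reverse.dropWhile (fun c => c ∈ ['.', ',', '!', '?'])).reverse)

-- m[k] / m.get(k) on a Python dict rendered as an association list (first match)
def pvLookup (m : List (String × String)) (k : String) : Option String :=
  (m.find? (fun p => p.1 == k)).map (·.2)

def pvNegReplies : List String :=
  ["no", "nope", "none", "neither", "n", "nah", "not really", "no thanks"]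

-- m["role"] compared against a literal (KeyError excluded by Pre_; "" matches no role literal)
def pvRole (m : List (String × String)) : String := (pvLookup m "role").getD ""
def pvContent (m : List (String × String)) : String := (pvLookup m "content").getD ""

-- ===== PORT A =====
def resolve_effective_query_py (query : String) (messages : List (List (String × String))) : String :=
  let q := PySem.Str.strip query
  let words := PySem.Str.split₀ q
  if words.length > 5 then q
  else
    let normalised := pvRstripSpecial (PySem.Str.lower q)
    let lastAssistant := messages.reverse.find? (fun m => pvRole m == "assistant")
    let chosen : Option String :=
      match lastAssistant with
      | some la =>
        if pvLookup la "source" == some "chips" then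
          if normalised ∈ pvNegReplies then
            match (messages.reverse.find? (fun m =>
                     pvRole m == "user" &&
                     pvRstripSpecial (PySem.Str.lower (PySem.Str.strip (pvContent m))) != normalised &&
                     (PySem.Str.split₀ (PySem.Str.strip (pvContent m))).length > 3)).map pvContent with
            | some o => if o ≠ "" then some o else none
            | none => none
          else none
        else none
      | none => none
    match chosen with
    | some o => o
    | none =>
      match (messages.reverse.find? (fun m =>
               pvRole m == "user" &&
               pvRstripSpecial (PySem.Str.lower (PySem.Str.strip (pvContent m))) != normalised &&
               (PySem.Str.split₀ (PySem.Str.strip (pvContent m))).length > 5)).map pvContent with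
      | some s => if s ≠ "" then s ++ " " ++ q else q
      | none => q

-- ===== PORT B =====
-- one step of B's single reverse loop; state = (assistant, original, substantive)
def pvStepB (normalised : String)
    (st : Option (List (String × String)) × Option String × Option String)
    (m : List (String × String)) :
    Option (List (String × String)) × Option String × Option String :=
  let role := pvRole m
  if role == "assistant" then
    match st.1 with
    | none => (some m, st.2.1, st.2.2)
    | some _ => st
  else if role == "user" then
    let c := pvContent m
    let cs := PySem.Str.strip c
    if pvRstripSpecial (PySem.Str.lower cs) != normalised then
      let n := (PySem.Str.split₀ cs).length
      let orig := match st.2.1 with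
        | none => if n > 3 then some c else none
        | some o => some o
      let sub := match st.2.2 with
        | none => if n > 5 then some c else none
        | some s => some s
      (st.1, orig, sub)
    else st
  else st

def resolve_effective_query_py_alt (query : String) (messages : List (List (String × String))) : String :=
  let q := PySem.Str.strip query
  if (PySem.Str.split₀ q).length > 5 then q
  else
    let normalised := pvRstripSpecial (PySem.Str.lower q)
    let st := messages.reverse.foldl (pvStepB normalised) (none, none, none)
    let chipAssistant : Bool :=
      match st.1 with
      | some a => pvLookup a "source" == some "chips"
      | none => false
    let origOk : Bool := match st.2.1 with
      | some o => o != ""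
      | none => false
    if chipAssistant && decide (normalised ∈ pvNegReplies) && origOk then
      st.2.1.getD ""
    else
      match st.2.2 with
      | some s => if s != "" then s ++ " " ++ q else q
      | none => q

-- ===== PRECONDITION & SPEC =====
-- Pre_ excludes inputs where Python A raises KeyError: a message without a "role" key, or a
-- user message without a "content" key, reached by A's scans (A never touches messages when
-- the stripped query has more than 5 words, hence the first disjunct).
def Pre_resolve_effective_query_py (query : String) (messages : List (List (String × String))) : Prop :=
  (PySem.Str.split₀ (PySem.Str.strip query)).length > 5 ∨
  ∀ m ∈ messages, (pvLookup m "role").isSome ∧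
    (pvLookup m "role" = some "user" → (pvLookup m "content").isSome)
instance (query : String) (messages : List (List (String × String))) : Decidable (Pre_resolve_effective_query_py query messages) := by unfold Pre_resolve_effective_query_py; infer_instance

def pvWitness_resolve_effective_query_py : String × (List (List (String × String))) :=
  ("no", [[("role", "user"), ("content", "tell me about the health scheme eligibility rules")],
          [("role", "assistant"), ("source", "chips")]])

def Spec_resolve_effective_query_py (query : String) (messages : List (List (String × String))) (out : String) : Prop := out = resolve_effective_query_py_alt query messages
instance (query : String) (messages : List (List (String × String))) (out : String) : Decidable (Spec_resolve_effective_query_py query messages out) := by unfold Spec_resolve_effective_query_py; infer_instance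

-- ===== CLAIM (what is proved, stated in full; the proofs are below) =====
def Claim_equal_resolve_effective_query_py : Prop := ∀ (query : String) (messages : List (List (String × String))), Dom_resolve_effective_query_py query messages → Pre_resolve_effective_query_py query messages → Spec_resolve_effective_query_py query messages (resolve_effective_query_py query messages)

-- ===== LEMMAS AND PROOFS =====

-- the three "first match from the end" values B's fold computes
def pvPredA (m : List (String × String)) : Bool := pvRole m == "assistant"
def pvPredU (normalised : String) (k : Nat) (m : List (String × String)) : Bool :=
  pvRole m == "user" &&
  pvRstripSpecial (PySem.Str.lower (PySem.Str.strip (pvContent m))) != normalised &&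
  (PySem.Str.split₀ (PySem.Str.strip (pvContent m))).length > k

def pvOr {α : Type} (a b : Option α) : Option α :=
  match a with
  | some x => some x
  | none => b

lemma pvStepB_loop (normalised : String) (l : List (List (String × String))) :
    ∀ st, l.foldl (pvStepB normalised) st =
      (pvOr st.1 (l.find? pvPredA),
       pvOr st.2.1 ((l.find? (pvPredU normalised 3)).map pvContent),
       pvOr st.2.2 ((l.find? (pvPredU normalised 5)).map pvContent)) := by
  induction l with
  | nil => intro st; obtain ⟨a, o, t⟩ := st; cases a <;> cases o <;> cases t <;> simp [pvOr]
  | cons m ms ih =>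
    intro st
    obtain ⟨a, o, s⟩ := st
    simp only [List.foldl_cons, ih]
    by_cases hA : pvRole m == "assistant"
    · have hU : (pvRole m == "user") = false := by
        cases h : pvRole m == "user"
        · rfl
        · exfalso
          have h1 : pvRole m = "assistant" := by simpa using hA
          have h2 : pvRole m = "user" := by simpa using h
          simp [h1] at h2
      cases a with
      | none =>
        simp [pvStepB, pvPredA, pvPredU, hA, hU, pvOr]
      | some a' =>
        simp [pvStepB, pvPredU, hA, hU, pvOr]
    · have hA' : (pvRole m == "assistant") = false := by
        cases h : pvRole m == "assistant"
        · rfl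
        · exact absurd h hA
      by_cases hU : pvRole m == "user"
      · by_cases hne : pvRstripSpecial (PySem.Str.lower (PySem.Str.strip (pvContent m))) != normalised
        · -- user branch, content differs from normalised
          simp only [pvStepB, hA', hU, hne, if_true, if_false, Bool.false_eq_true]
          simp only [List.find?_cons, pvPredA, pvPredU, hA', hU, hne, Bool.true_and]
          cases o <;> cases s <;>
            cases h3 : decide (3 < (PySem.Str.split₀ (PySem.Str.strip (pvContent m))).length) <;>
            cases h5 : decide (5 < (PySem.Str.split₀ (PySem.Str.strip (pvContent m))).length) <;>
            simp_all [pvOr] <;> split_ifs <;> simp_all <;> omega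
        · have hne' : (pvRstripSpecial (PySem.Str.lower (PySem.Str.strip (pvContent m))) != normalised) = false := by
            cases h : (pvRstripSpecial (PySem.Str.lower (PySem.Str.strip (pvContent m))) != normalised)
            · rfl
            · exact absurd h hne
          simp [pvStepB, pvPredA, pvPredU, hA', hU, hne', pvOr]
      · have hU' : (pvRole m == "user") = false := by
          cases h : pvRole m == "user"
          · rfl
          · exact absurd h hU
        simp [pvStepB, pvPredA, pvPredU, hA', hU', pvOr]

-- ===== VERDICT (by name: the statement is the Claim_ definition above) =====
theorem resolve_effective_query_py_spec : Claim_equal_resolve_effective_query_py := by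
  intro query messages _ _
  unfold Spec_resolve_effective_query_py resolve_effective_query_py resolve_effective_query_py_alt
  by_cases hlen : (PySem.Str.split₀ (PySem.Str.strip query)).length > 5
  · simp [hlen]
  · simp only [hlen, if_false]
    rw [pvStepB_loop]
    simp only [pvOr]
    have eA : (fun m => pvRole m == "assistant") = pvPredA := rfl
    have eU3 : (fun m => pvRole m == "user" &&
        pvRstripSpecial (PySem.Str.lower (PySem.Str.strip (pvContent m))) !=
          pvRstripSpecial (PySem.Str.lower (PySem.Str.strip query)) &&
        decide ((PySem.Str.split₀ (PySem.Str.strip (pvContent m))).length > 3))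
        = pvPredU (pvRstripSpecial (PySem.Str.lower (PySem.Str.strip query))) 3 := rfl
    have eU5 : (fun m => pvRole m == "user" &&
        pvRstripSpecial (PySem.Str.lower (PySem.Str.strip (pvContent m))) !=
          pvRstripSpecial (PySem.Str.lower (PySem.Str.strip query)) &&
        decide ((PySem.Str.split₀ (PySem.Str.strip (pvContent m))).length > 5))
        = pvPredU (pvRstripSpecial (PySem.Str.lower (PySem.Str.strip query))) 5 := rfl
    rw [eA, eU3, eU5]
    rcases hfa : List.find? pvPredA messages.reverse with _ | la <;>
    rcases hfo : List.find? (pvPredU (pvRstripSpecial (PySem.Str.lower (PySem.Str.strip query))) 3) messages.reverse with _ | o <;>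
    rcases hfs : List.find? (pvPredU (pvRstripSpecial (PySem.Str.lower (PySem.Str.strip query))) 5) messages.reverse with _ | s <;>
    simp only [Option.map_some, Option.map_none] <;>
    (try by_cases hch : (pvLookup la "source" == some "chips") = true) <;>
    (try by_cases hmem : pvRstripSpecial (PySem.Str.lower (PySem.Str.strip query)) ∈ pvNegReplies) <;>
    (try by_cases ho : pvContent o = "") <;>
    (try by_cases hs : pvContent s = "") <;>
    simp_all [bne, Option.getD]
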